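-- pv_equiv track=rewrite | github.com/blzzua/codewars | 7-kyu/reverse_sublists_of_even_numbers.py | rev_sub
-- ===== SOURCE A (Python) =====
-- def rev_sub(arr):
--     rev_sub_arr = []
--     res = []
--     for i in arr:
--         if i % 2 == 1:
--             if rev_sub_arr != []:
--                 res.extend(rev_sub_arr[::-1])
--                 rev_sub_arr = []
--             res.append(i)
--         else: # if i % 2 == 0:
--             rev_sub_arr.append(i)
--     res.extend(rev_sub_arr[::-1])
--     return res
-- ===== SOURCE B (Python) =====
-- def rev_sub(arr):
--     n = len(arr)
--     st = []                     # st[i] = start index of the maximal even run containing i (i itself if arr[i] is odd)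
--     for i in range(n):
--         if arr[i] % 2 == 0 and i > 0 and arr[i - 1] % 2 == 0:
--             st.append(st[-1])
--         else:
--             st.append(i)
--     en = [0] * n                # en[i] = end index of that run
--     for i in range(n - 1, -1, -1):
--         if arr[i] % 2 == 0 and i + 1 < n and arr[i + 1] % 2 == 0:
--             en[i] = en[i + 1]
--         else:
--             en[i] = i
--     # each even element is emitted at its mirrored position inside its run; odds stay put
--     return [arr[i] if arr[i] % 2 else arr[st[i] + en[i] - i] for i in range(n)]
-- ===== Notes on version B (the rewrite author's own statement) =====
-- stated objective: alternative
-- what changed: Replaces A's accumulate-and-flush buffer loop with a positional index-mirror algorithm: two precomputation passes record each even run's start and end index, then every output element is read directly from arr at its mirrored position st[i]+en[i]-i (no buffer, no list reversal, no run materialization).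
import Mathlib
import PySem

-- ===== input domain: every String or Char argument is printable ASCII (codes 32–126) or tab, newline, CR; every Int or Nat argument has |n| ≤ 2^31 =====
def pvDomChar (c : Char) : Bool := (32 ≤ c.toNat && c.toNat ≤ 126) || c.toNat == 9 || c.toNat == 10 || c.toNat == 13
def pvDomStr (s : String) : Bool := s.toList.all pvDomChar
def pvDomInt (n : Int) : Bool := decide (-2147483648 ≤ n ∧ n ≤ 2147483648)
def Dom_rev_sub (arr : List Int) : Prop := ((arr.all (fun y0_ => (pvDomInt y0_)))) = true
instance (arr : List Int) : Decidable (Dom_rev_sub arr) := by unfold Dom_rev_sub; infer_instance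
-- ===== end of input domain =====

-- B replaces A's accumulate-and-flush buffer loop with a positional index-mirror
-- algorithm: two passes record each even run's start/end index, then each output
-- element is read directly at its mirrored position (objective: alternative; same O(n)).

-- ===== PORT A =====
-- the for-loop over arr with state (rev_sub_arr, res)
def revSubLoop : List Int → List Int → List Int → (List Int × List Int)
  | buf, res, [] => (buf, res)
  | buf, res, i :: rest =>
    if PySem.Int.mod i 2 == 1 then
      -- flush the buffer (rev_sub_arr[::-1] is its reverse), append i
      revSubLoop [] ((if buf ≠ [] then res ++ buf.reverse else res) ++ [i]) rest
    else
      revSubLoop (buf ++ [i]) res rest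

def rev_sub (arr : List Int) : List Int :=
  let s := revSubLoop [] [] arr
  s.2 ++ s.1.reverse   -- res.extend(rev_sub_arr[::-1]); return res

-- ===== PORT B =====
-- key parity test x % 2 == 0
def pvEven (x : Int) : Bool := PySem.Int.mod x 2 == 0

-- first pass: st[i] = st[-1] if arr[i] even, i > 0 and arr[i-1] even, else i.
-- The recursion carries the loop index and (arr[i-1], st[-1]) (none at i = 0).
def stB : List Int → Int → Option (Int × Int) → List Int
  | [], _, _ => []
  | x :: xs, i, prev =>
    let s : Int :=
      match prev with
      | some (px, ps) => if pvEven x && pvEven px then ps else i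
      | none => i
    s :: stB xs (i + 1) (some (x, s))

-- second pass, right to left: en[i] = en[i+1] if arr[i] even, i+1 < n and arr[i+1] even, else i.
def enB : List Int → Int → List Int
  | [], _ => []
  | x :: xs, i =>
    let rest := enB xs (i + 1)
    (match xs with
     | [] => i
     | y :: _ => if pvEven x && pvEven y then rest.headD i else i) :: rest

-- the comprehension body: arr[i] if arr[i] % 2 else arr[st[i] + en[i] - i]
def fB (arr st en : List Int) (i : Int) : Int :=
  let x := PySem.List.pyGetD arr i 0
  if PySem.Int.mod x 2 ≠ 0 then x
  else PySem.List.pyGetD arr (PySem.List.pyGetD st i 0 + PySem.List.pyGetD en i 0 - i) 0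

def rev_sub_alt (arr : List Int) : List Int :=
  (PySem.List.pyRange 0 (arr.length : Int) 1).map (fB arr (stB arr 0 none) (enB arr 0))

-- ===== PRECONDITION & SPEC =====
def Spec_rev_sub (arr : List Int) (out : List Int) : Prop := out = rev_sub_alt arr
instance (arr : List Int) (out : List Int) : Decidable (Spec_rev_sub arr out) := by unfold Spec_rev_sub; infer_instance

-- ===== CLAIM (what is proved, stated in full; the proofs are below) =====
def Claim_equal_rev_sub : Prop := ∀ (arr : List Int), Dom_rev_sub arr → Spec_rev_sub arr (rev_sub arr)

-- ===== LEMMAS AND PROOFS =====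

-- proof-only reference value: the list split into maximal parity runs, even runs reversed
def revSubGroups : List Int → List Int
  | [] => []
  | x :: xs =>
    let g := x :: xs.takeWhile (fun y => pvEven y == pvEven x)
    let rest := xs.dropWhile (fun y => pvEven y == pvEven x)
    (if pvEven x then g.reverse else g) ++ revSubGroups rest
termination_by l => l.length
decreasing_by
  simp only [List.length_cons]
  exact Nat.lt_succ_of_le (List.length_dropWhile_le _ _)

-- parity bookkeeping: Python's `i % 2 == 1` is exactly `¬ (i % 2 == 0)`
theorem pvEven_false_iff (i : Int) : pvEven i = false ↔ PySem.Int.mod i 2 = 1 := by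
  unfold pvEven
  rcases PySem.Int.mod_two_eq i with h | h
  · rw [h]; simp
  · rw [h]; simp

theorem pvEven_mod_zero {i : Int} (h : pvEven i = true) : PySem.Int.mod i 2 = 0 := by
  rcases PySem.Int.mod_two_eq i with h0 | h0
  · exact h0
  · exact absurd h (by simp [(pvEven_false_iff i).mpr h0])

-- ---------- A's loop equals revSubGroups ----------

-- A's loop: the res accumulator is a pure prefix
theorem loop_res (arr : List Int) : ∀ buf res,
    revSubLoop buf res arr = ((revSubLoop buf [] arr).1, res ++ (revSubLoop buf [] arr).2) := by
  induction arr with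
  | nil => intro buf res; simp [revSubLoop]
  | cons i rest ih =>
    intro buf res
    by_cases h : PySem.Int.mod i 2 = 1
    · have hfl : ∀ r : List Int, (if buf ≠ [] then r ++ buf.reverse else r) = r ++ buf.reverse := by
        intro r; by_cases hb : buf = [] <;> simp [hb]
      simp only [revSubLoop, h, beq_self_eq_true, if_true, hfl]
      conv_lhs => rw [ih]
      conv_rhs => rw [ih]
      simp
    · have h0 : PySem.Int.mod i 2 = 0 := by
        rcases PySem.Int.mod_two_eq i with h0 | h0
        · exact h0
        · exact absurd h0 h
      have h' : (PySem.Int.mod i 2 == 1) = false := by rw [h0]; rfl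
      simp only [revSubLoop, h']
      exact ih _ _

-- proof-only reference: A's loop with pending buffer buf, written as structural recursion
def gpRef : List Int → List Int → List Int
  | buf, [] => buf.reverse
  | buf, x :: xs => if pvEven x then gpRef (buf ++ [x]) xs else buf.reverse ++ x :: gpRef [] xs

-- A's flushed output equals the reference
theorem loop_eq_gpRef (arr : List Int) : ∀ buf,
    (revSubLoop buf [] arr).2 ++ (revSubLoop buf [] arr).1.reverse = gpRef buf arr := by
  induction arr with
  | nil => intro buf; simp [revSubLoop, gpRef]
  | cons i rest ih =>
    intro buf
    by_cases h : pvEven i = true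
    · have h1 : (PySem.Int.mod i 2 == 1) = false := by rw [pvEven_mod_zero h]; rfl
      simp only [revSubLoop, h1, gpRef, h, if_true]
      exact ih _
    · have hE : pvEven i = false := by simpa using h
      have h1 : PySem.Int.mod i 2 = 1 := (pvEven_false_iff i).mp hE
      have hfl : (if buf ≠ [] then ([] : List Int) ++ buf.reverse else []) = buf.reverse := by
        by_cases hb : buf = [] <;> simp [hb]
      simp only [revSubLoop, h1, beq_self_eq_true, if_true, hfl, gpRef, hE,
        Bool.false_eq_true, if_false]
      rw [loop_res]
      simp [← ih []]

-- peeling one odd element off a group is peeling it off the output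
theorem groups_odd (x : Int) (xs : List Int) (h : pvEven x = false) :
    revSubGroups (x :: xs) = x :: revSubGroups xs := by
  cases xs with
  | nil => simp [revSubGroups, h]
  | cons y ys =>
    by_cases hy : pvEven y = true
    · simp [revSubGroups, h, hy]
    · have hy' : pvEven y = false := by simpa using hy
      simp [revSubGroups, h, hy']

-- the first (even) group of xs, reversed, followed by the rest's groups, is all the groups
theorem groups_even_split (xs : List Int) :
    (xs.takeWhile pvEven).reverse ++ revSubGroups (xs.dropWhile pvEven) = revSubGroups xs := by
  cases xs with
  | nil => simp [revSubGroups]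
  | cons x l =>
    by_cases h : pvEven x = true
    · simp [revSubGroups, h]
    · have h' : pvEven x = false := by simpa using h
      simp [h']

-- the reference equals the group decomposition
theorem gpRef_eq (arr : List Int) : ∀ buf,
    gpRef buf arr = (buf ++ arr.takeWhile pvEven).reverse ++ revSubGroups (arr.dropWhile pvEven) := by
  induction arr with
  | nil => intro buf; simp [gpRef, revSubGroups]
  | cons x xs ih =>
    intro buf
    by_cases h : pvEven x = true
    · simp only [gpRef, h, if_true, List.takeWhile_cons, List.dropWhile_cons]
      rw [ih]
      simp
    · have h' : pvEven x = false := by simpa using h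
      simp only [gpRef, h', Bool.false_eq_true, if_false, List.takeWhile_cons, List.dropWhile_cons]
      rw [ih []]
      simp only [List.nil_append]
      rw [groups_odd x xs h']
      simp [groups_even_split xs]

theorem rev_sub_eq_groups (arr : List Int) : rev_sub arr = revSubGroups arr := by
  unfold rev_sub
  show (revSubLoop [] [] arr).2 ++ (revSubLoop [] [] arr).1.reverse = revSubGroups arr
  rw [loop_eq_gpRef, gpRef_eq]
  simpa using groups_even_split arr

-- ---------- B's index-mirror map equals revSubGroups ----------

theorem length_stB : ∀ (xs : List Int) (b : Int) (p : Option (Int × Int)),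
    (stB xs b p).length = xs.length := by
  intro xs
  induction xs with
  | nil => intro b p; rfl
  | cons x xs ih => intro b p; simp [stB, ih]

theorem length_enB : ∀ (xs : List Int) (b : Int), (enB xs b).length = xs.length := by
  intro xs
  induction xs with
  | nil => intro b; rfl
  | cons x xs ih => intro b; simp [enB, ih]

theorem enB_cons (x : Int) (xs : List Int) (i : Int) :
    enB (x :: xs) i = (match xs with
      | [] => i
      | y :: _ => if pvEven x && pvEven y then (enB xs (i + 1)).headD i else i) :: enB xs (i + 1) := rfl

theorem enB_cons_nil (x : Int) (i : Int) : enB [x] i = [i] := rfl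

theorem enB_cons_cons (x y : Int) (t : List Int) (i : Int) :
    enB (x :: y :: t) i =
      (if pvEven x && pvEven y then (enB (y :: t) (i + 1)).headD i else i) :: enB (y :: t) (i + 1) := rfl

theorem stB_prev_odd (xs : List Int) (b px s : Int) (h : pvEven px = false) :
    stB xs b (some (px, s)) = stB xs b none := by
  cases xs with
  | nil => rfl
  | cons x l => simp [stB, h]

theorem stB_shift : ∀ (xs : List Int) (b c : Int) (p : Option (Int × Int)),
    stB xs (b + c) (p.map (fun q => (q.1, q.2 + c))) = (stB xs b p).map (· + c) := by
  intro xs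
  induction xs with
  | nil => intro b c p; rfl
  | cons x l ih =>
    intro b c p
    cases p with
    | none =>
      simp only [stB, Option.map_none, List.map_cons]
      congr 1
      have h := ih (b + 1) c (some (x, b))
      simp only [Option.map_some] at h
      rw [show b + c + 1 = b + 1 + c by ring, h]
    | some q =>
      obtain ⟨px, ps⟩ := q
      simp only [stB, Option.map_some, List.map_cons]
      by_cases h : (pvEven x && pvEven px) = true
      · simp only [if_pos h]
        congr 1
        have h2 := ih (b + 1) c (some (x, ps))
        simp only [Option.map_some] at h2
        rw [show b + c + 1 = b + 1 + c by ring, h2]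
      · simp only [if_neg h]
        congr 1
        have h2 := ih (b + 1) c (some (x, b))
        simp only [Option.map_some] at h2
        rw [show b + c + 1 = b + 1 + c by ring, h2]

theorem enB_shift : ∀ (xs : List Int) (b c : Int), enB xs (b + c) = (enB xs b).map (· + c) := by
  intro xs
  induction xs with
  | nil => intro b c; rfl
  | cons x l ih =>
    intro b c
    have hrec : enB l (b + c + 1) = (enB l (b + 1)).map (· + c) := by
      rw [show b + c + 1 = (b + 1) + c by ring, ih]
    cases l with
    | nil => simp [enB_cons_nil]
    | cons y t =>
      rw [enB_cons_cons, enB_cons_cons, List.map_cons, hrec]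
      congr 1
      by_cases h : (pvEven x && pvEven y) = true
      · simp only [if_pos h]
        cases hE : enB (y :: t) (b + 1) with
        | nil =>
          exfalso
          have hl := length_enB (y :: t) (b + 1)
          rw [hE] at hl; simp at hl
        | cons e0 t0 => simp [hE]
      · simp only [if_neg h]

theorem stB_run_odd (o : Int) (rest : List Int) (ho : pvEven o = false) :
    ∀ (e : List Int) (b s px : Int), (∀ x ∈ e, pvEven x = true) → pvEven px = true →
    stB (e ++ o :: rest) b (some (px, s)) =
      List.replicate e.length s ++ (b + e.length) :: stB rest (b + e.length + 1) (some (o, b + e.length)) := by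
  intro e
  induction e with
  | nil =>
    intro b s px _ hpx
    simp [stB, ho]
  | cons x e' ih =>
    intro b s px he hpx
    have hx : pvEven x = true := he x (by simp)
    have he' : ∀ y ∈ e', pvEven y = true := fun y hy => he y (by simp [hy])
    simp only [List.cons_append, stB, hx, hpx, Bool.and_self, if_true]
    rw [ih (b + 1) s x he' hx]
    simp only [List.length_cons, List.replicate_succ, List.cons_append]
    rw [show b + 1 + (e'.length : Int) = b + ((e'.length + 1 : Nat) : Int) by push_cast; ring]

theorem stB_top_odd (o : Int) (rest e : List Int) (b : Int)
    (he : ∀ x ∈ e, pvEven x = true) (ho : pvEven o = false) :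
    stB (e ++ o :: rest) b none =
      List.replicate e.length b ++ (b + e.length) :: stB rest (b + e.length + 1) (some (o, b + e.length)) := by
  cases e with
  | nil => simp [stB, ho]
  | cons x e' =>
    have hx : pvEven x = true := he x (by simp)
    have he' : ∀ y ∈ e', pvEven y = true := fun y hy => he y (by simp [hy])
    simp only [List.cons_append, stB]
    rw [stB_run_odd o rest ho e' (b + 1) b x he' hx]
    simp only [List.length_cons, List.replicate_succ, List.cons_append]
    rw [show b + 1 + (e'.length : Int) = b + ((e'.length + 1 : Nat) : Int) by push_cast; ring]

theorem stB_run_nil : ∀ (e : List Int) (b s px : Int), (∀ x ∈ e, pvEven x = true) → pvEven px = true →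
    stB e b (some (px, s)) = List.replicate e.length s := by
  intro e
  induction e with
  | nil => intro b s px _ _; rfl
  | cons x e' ih =>
    intro b s px he hpx
    have hx : pvEven x = true := he x (by simp)
    simp only [stB, hx, hpx, Bool.and_self, if_true, List.length_cons, List.replicate_succ]
    congr 1
    exact ih (b + 1) s x (fun y hy => he y (by simp [hy])) hx

theorem stB_top_nil (e : List Int) (b : Int) (he : ∀ x ∈ e, pvEven x = true) :
    stB e b none = List.replicate e.length b := by
  cases e with
  | nil => rfl
  | cons x e' =>
    have hx : pvEven x = true := he x (by simp)
    simp only [stB, List.length_cons, List.replicate_succ]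
    congr 1
    exact stB_run_nil e' (b + 1) b x (fun y hy => he y (by simp [hy])) hx

theorem enB_top_odd (o : Int) (rest : List Int) (ho : pvEven o = false) :
    ∀ (e : List Int) (b : Int), (∀ x ∈ e, pvEven x = true) →
    enB (e ++ o :: rest) b =
      List.replicate e.length (b + e.length - 1) ++ (b + e.length) :: enB rest (b + e.length + 1) := by
  intro e
  induction e with
  | nil =>
    intro b _
    cases rest with
    | nil => simp [enB_cons_nil, enB]
    | cons r t =>
      rw [List.nil_append, enB_cons_cons]
      simp [ho]
  | cons x e' ih =>
    intro b he
    have hx : pvEven x = true := he x (by simp)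
    have he' : ∀ y ∈ e', pvEven y = true := fun y hy => he y (by simp [hy])
    have hrec := ih (b + 1) he'
    cases e' with
    | nil =>
      simp only [List.nil_append, List.length_nil, Nat.cast_zero, add_zero, List.replicate_zero] at hrec
      rw [List.cons_append, List.nil_append, enB_cons_cons, hrec]
      simp only [hx, ho, Bool.and_false, Bool.false_eq_true, if_false, List.length_cons,
        List.length_nil, Nat.cast_one, List.replicate_succ, List.replicate_zero, List.nil_append,
        Nat.zero_add, zero_add]
      norm_num
    | cons z e'' =>
      have hz : pvEven z = true := he' z (by simp)
      simp only [List.cons_append] at hrec ⊢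
      rw [enB_cons_cons, hrec]
      simp only [hx, hz, Bool.and_self, if_pos, List.length_cons, List.replicate_succ,
        List.headD_cons, List.cons_append, if_true]
      rw [show b + 1 + ((e''.length + 1 : Nat) : Int) = b + ((e''.length + 1 + 1 : Nat) : Int) by push_cast; ring]

theorem enB_top_nil : ∀ (e : List Int) (b : Int), (∀ x ∈ e, pvEven x = true) →
    enB e b = List.replicate e.length (b + e.length - 1) := by
  intro e
  induction e with
  | nil => intro b _; rfl
  | cons x e' ih =>
    intro b he
    have hx : pvEven x = true := he x (by simp)
    have he' : ∀ y ∈ e', pvEven y = true := fun y hy => he y (by simp [hy])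
    have hrec := ih (b + 1) he'
    cases e' with
    | nil => simp [enB_cons_nil]
    | cons z e'' =>
      have hz : pvEven z = true := he' z (by simp)
      rw [enB_cons_cons, hrec]
      simp only [hx, hz, Bool.and_self, if_true, List.length_cons, List.replicate_succ,
        List.headD_cons]
      rw [show b + 1 + ((e''.length + 1 : Nat) : Int) = b + ((e''.length + 1 + 1 : Nat) : Int) by push_cast; ring]

-- every recorded run start is at least the base index (entries come from b or carried starts)
theorem stB_mem_lb : ∀ (xs : List Int) (b lo : Int) (p : Option (Int × Int)),
    (∀ px s, p = some (px, s) → lo ≤ s) → lo ≤ b → ∀ v ∈ stB xs b p, lo ≤ v := by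
  intro xs
  induction xs with
  | nil => intro b lo p _ _ v hv; simp [stB] at hv
  | cons x l ih =>
    intro b lo p hp hb v hv
    cases p with
    | none =>
      simp only [stB, List.mem_cons] at hv
      rcases hv with rfl | hv
      · exact hb
      · exact ih (b + 1) lo (some (x, b)) (fun px' s' h' => by cases h'; exact hb) (by omega) v hv
    | some q =>
      obtain ⟨px, ps⟩ := q
      by_cases h : (pvEven x && pvEven px) = true
      · have hps : lo ≤ ps := hp px ps rfl
        simp only [stB, if_pos h, List.mem_cons] at hv
        rcases hv with rfl | hv
        · exact hps
        · exact ih (b + 1) lo (some (x, ps))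
            (fun px' s' h' => by cases h'; exact hps) (by omega) v hv
      · simp only [stB, if_neg h, List.mem_cons] at hv
        rcases hv with rfl | hv
        · exact hb
        · exact ih (b + 1) lo (some (x, b)) (fun px' s' h' => by cases h'; exact hb) (by omega) v hv

theorem enB_getD_lb : ∀ (xs : List Int) (b : Int) (j : Nat), j < xs.length →
    b + j ≤ (enB xs b).getD j 0 := by
  intro xs
  induction xs with
  | nil => intro b j hj; simp at hj
  | cons x l ih =>
    intro b j hj
    cases j with
    | zero =>
      cases l with
      | nil => simp [enB_cons_nil]
      | cons y t =>
        have h0 := ih (b + 1) 0 (by simp)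
        rw [enB_cons_cons, List.getD_cons_zero]
        by_cases h : (pvEven x && pvEven y) = true
        · simp only [if_pos h]
          cases hE : enB (y :: t) (b + 1) with
          | nil =>
            have hl := length_enB (y :: t) (b + 1)
            rw [hE] at hl; simp at hl
          | cons e0 t0 =>
            rw [hE] at h0
            simp only [List.getD_cons_zero, Nat.cast_zero, add_zero] at h0
            simpa using le_trans (by omega) h0
        · rw [if_neg h]; simp
    | succ j' =>
      have hih := ih (b + 1) j' (by simpa using Nat.lt_of_succ_lt_succ hj)
      rw [enB_cons, List.getD_cons_succ]
      push_cast
      push_cast at hih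
      omega

theorem pyGetD_append_shift (pre ys : List Int) (m : Int) (d : Int) (hm : 0 ≤ m) :
    PySem.List.pyGetD (pre ++ ys) ((pre.length : Int) + m) d = PySem.List.pyGetD ys m d := by
  have h1 : ((pre.length : Int) + m) = ((pre.length + m.toNat : Nat) : Int) := by push_cast; omega
  rw [h1, show m = ((m.toNat : Nat) : Int) by omega, PySem.List.pyGetD_natCast,
    PySem.List.pyGetD_natCast, List.getD_append_right _ _ _ _ (by omega)]
  congr 1
  omega

theorem pyGetD_append_left (pre ys : List Int) (i : Int) (d : Int) (h0 : 0 ≤ i)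
    (h : i < (pre.length : Int)) :
    PySem.List.pyGetD (pre ++ ys) i d = PySem.List.pyGetD pre i d := by
  have h1 : i = ((i.toNat : Nat) : Int) := by omega
  rw [h1, PySem.List.pyGetD_natCast, PySem.List.pyGetD_natCast]
  exact List.getD_append _ _ _ _ (by omega)

-- reading xs back to front through mirrored indices is xs.reverse
theorem map_pyGetD_rev (xs : List Int) (d : Int) :
    (PySem.List.pyRange 0 (xs.length : Int) 1).map
      (fun i => PySem.List.pyGetD xs ((xs.length : Int) - 1 - i) d) = xs.reverse := by
  apply List.ext_getElem
  · simp [PySem.List.length_pyRange_one]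
  · intro t h1 h2
    simp only [List.getElem_map, PySem.List.getElem_pyRange_one, List.getElem_reverse]
    have ht : t < xs.length := by
      simpa [PySem.List.length_pyRange_one] using h1
    have hidx : (xs.length : Int) - 1 - (0 + (t : Int)) = ((xs.length - 1 - t : Nat) : Int) := by
      push_cast; omega
    rw [hidx, PySem.List.pyGetD_natCast]
    rw [List.getD_eq_getElem _ _ (by omega)]

-- small helpers for the main computation

theorem dropWhile_head_false : ∀ (l : List Int) (o : Int) (rest : List Int),
    l.dropWhile pvEven = o :: rest → pvEven o = false := by
  intro l
  induction l with
  | nil => intro o rest h; simp at h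
  | cons x t ih =>
    intro o rest h
    by_cases hx : pvEven x = true
    · rw [List.dropWhile_cons_of_pos hx] at h
      exact ih o rest h
    · rw [List.dropWhile_cons_of_neg hx] at h
      cases h
      simpa using hx

theorem pyGetD_replicate (n : Nat) (v : Int) (i : Int) (h0 : 0 ≤ i) (h : i < (n : Int)) :
    PySem.List.pyGetD (List.replicate n v) i 0 = v := by
  rw [PySem.List.pyGetD_eq_getElem _ _ h0 (by simpa using h)]
  simp

theorem fB_even (arr st en : List Int) (i : Int)
    (h : PySem.Int.mod (PySem.List.pyGetD arr i 0) 2 = 0) :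
    fB arr st en i =
      PySem.List.pyGetD arr (PySem.List.pyGetD st i 0 + PySem.List.pyGetD en i 0 - i) 0 := by
  simp only [fB]
  rw [if_neg (not_ne_iff.mpr h)]

theorem fB_odd (arr st en : List Int) (i : Int)
    (h : PySem.Int.mod (PySem.List.pyGetD arr i 0) 2 ≠ 0) :
    fB arr st en i = PySem.List.pyGetD arr i 0 := by
  simp only [fB]
  rw [if_pos h]

-- the first (even) segment of the map produces the reversed run
theorem seg1 (e tail : List Int) (he : ∀ x ∈ e, pvEven x = true) (st en : List Int)
    (hst : ∀ i : Int, 0 ≤ i → i < (e.length : Int) → PySem.List.pyGetD st i 0 = 0)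
    (hen : ∀ i : Int, 0 ≤ i → i < (e.length : Int) → PySem.List.pyGetD en i 0 = (e.length : Int) - 1) :
    (PySem.List.pyRange 0 (e.length : Int) 1).map (fB (e ++ tail) st en) = e.reverse := by
  rw [← map_pyGetD_rev e 0]
  apply List.map_congr_left
  intro i hi
  obtain ⟨h0, h1⟩ := (PySem.List.mem_pyRange_one).mp hi
  have hxe : PySem.List.pyGetD (e ++ tail) i 0 = PySem.List.pyGetD e i 0 :=
    pyGetD_append_left e tail i 0 h0 h1
  have hmem : PySem.List.pyGetD e i 0 ∈ e := by
    rw [PySem.List.pyGetD_eq_getElem _ _ h0 (by simpa using h1)]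
    exact List.getElem_mem _
  have heven : PySem.Int.mod (PySem.List.pyGetD (e ++ tail) i 0) 2 = 0 := by
    rw [hxe]; exact pvEven_mod_zero (he _ hmem)
  rw [fB_even _ _ _ _ heven, hst i h0 h1, hen i h0 h1]
  rw [show (0 : Int) + ((e.length : Int) - 1) - i = (e.length : Int) - 1 - i by ring]
  by_cases hk : (e.length : Int) - 1 - i < (e.length : Int)
  · exact pyGetD_append_left e tail _ 0 (by omega) hk
  · omega

-- the map over indices equals the group decomposition
theorem mapOut_eq_groups : ∀ (N : Nat) (arr : List Int), arr.length ≤ N →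
    (PySem.List.pyRange 0 (arr.length : Int) 1).map (fB arr (stB arr 0 none) (enB arr 0)) =
      revSubGroups arr := by
  intro N
  induction N with
  | zero =>
    intro arr h
    have : arr = [] := List.eq_nil_of_length_eq_zero (Nat.le_zero.mp h)
    subst this
    simp [revSubGroups, PySem.List.pyRange_one_eq_nil]
  | succ N ih =>
    intro arr hlen
    have hsplit : arr.takeWhile pvEven ++ arr.dropWhile pvEven = arr :=
      List.takeWhile_append_dropWhile
    have he : ∀ x ∈ arr.takeWhile pvEven, pvEven x = true := fun x hx =>
      List.mem_takeWhile_imp hx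
    cases hdw : arr.dropWhile pvEven with
    | nil =>
      -- all elements even: the whole list is one run, the output is its reverse
      have harr : arr.takeWhile pvEven = arr := by rw [hdw] at hsplit; simpa using hsplit
      have heA : ∀ x ∈ arr, pvEven x = true := by rw [← harr]; exact he
      have hG : revSubGroups arr = arr.reverse := by
        rw [← groups_even_split arr, hdw, harr]
        simp [revSubGroups]
      have hst : stB arr 0 none = List.replicate arr.length 0 := stB_top_nil arr 0 heA
      have hen : enB arr 0 = List.replicate arr.length ((arr.length : Int) - 1) := by
        have := enB_top_nil arr 0 heA
        simpa using this
      rw [hG, hst, hen]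
      have := seg1 arr [] heA (List.replicate arr.length 0)
        (List.replicate arr.length ((arr.length : Int) - 1))
        (fun i h0 h1 => pyGetD_replicate _ _ i h0 h1)
        (fun i h0 h1 => pyGetD_replicate _ _ i h0 h1)
      simpa using this
    | cons o rest =>
      have ho : pvEven o = false := dropWhile_head_false arr o rest hdw
      have harr : arr = arr.takeWhile pvEven ++ o :: rest := by
        conv_lhs => rw [← hsplit, hdw]
      set e : List Int := arr.takeWhile pvEven with hedef
      set k : Nat := e.length with hk
      have hlen2 : arr.length = k + 1 + rest.length := by
        rw [harr]; simp [hk]; omega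
      have hrl : rest.length ≤ N := by omega
      have IH := ih rest hrl
      -- characterize the two index tables
      have hst : stB arr 0 none =
          List.replicate k 0 ++ (k : Int) :: (stB rest 0 none).map (· + ((k : Int) + 1)) := by
        conv_lhs => rw [harr]
        rw [stB_top_odd o rest e 0 he ho, stB_prev_odd rest _ o _ ho]
        have hshift := stB_shift rest 0 ((k : Int) + 1) none
        simp only [Option.map_none, zero_add] at hshift ⊢
        rw [← hk, hshift]
      have hen : enB arr 0 =
          List.replicate k ((k : Int) - 1) ++ (k : Int) :: (enB rest 0).map (· + ((k : Int) + 1)) := by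
        conv_lhs => rw [harr]
        rw [enB_top_odd o rest ho e 0 he]
        have hshift := enB_shift rest 0 ((k : Int) + 1)
        simp only [zero_add] at hshift ⊢
        rw [← hk, hshift]
      -- split the index range into the first run, the odd element, and the remainder
      have hsplitR : PySem.List.pyRange 0 (arr.length : Int) 1 =
          PySem.List.pyRange 0 (k : Int) 1 ++ (k : Int) ::
            PySem.List.pyRange ((k : Int) + 1) (arr.length : Int) 1 := by
        rw [PySem.List.pyRange_one_append 0 (k : Int) (arr.length : Int) (by positivity)
          (by rw [hlen2]; push_cast; omega)]
        congr 1
        rw [PySem.List.pyRange_one_cons (by rw [hlen2]; push_cast; omega)]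
      have hG : revSubGroups arr = e.reverse ++ o :: revSubGroups rest := by
        rw [← groups_even_split arr, hdw, groups_odd o rest ho]
      rw [hsplitR, hG, List.map_append, List.map_cons]
      congr 1
      · -- the even run, reversed
        rw [hst, hen]
        conv_lhs => rw [show fB arr = fB (e ++ o :: rest) by rw [← harr]]
        apply seg1 e (o :: rest) he
        · intro i h0 h1
          rw [pyGetD_append_left _ _ i 0 h0 (by simpa using h1)]
          exact pyGetD_replicate _ _ i h0 h1
        · intro i h0 h1
          rw [pyGetD_append_left _ _ i 0 h0 (by simpa using h1)]
          exact pyGetD_replicate _ _ i h0 h1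
      · congr 1
        · -- the odd separator stays put
          have hx : PySem.List.pyGetD arr (k : Int) 0 = o := by
            rw [harr, show (k : Int) = ((e.length : Int) + 0) by rw [hk]; ring,
              pyGetD_append_shift e (o :: rest) 0 0 le_rfl, PySem.List.pyGetD_zero_cons]
          rw [fB_odd _ _ _ _ (by rw [hx, (pvEven_false_iff o).mp ho]; norm_num), hx]
        · -- the remainder: reindex and use the induction hypothesis
          rw [← IH]
          have hK1 : ((arr.length : Int) - ((k : Int) + 1)).toNat = rest.length := by
            rw [hlen2]; push_cast; omega
          have hK2 : ((rest.length : Int) - 0).toNat = rest.length := by omega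
          rw [PySem.List.pyRange_one ((k : Int) + 1) (arr.length : Int),
            PySem.List.pyRange_one 0 (rest.length : Int), hK1, hK2, List.map_map, List.map_map]
          apply List.map_congr_left
          intro t ht
          have htl : t < rest.length := List.mem_range.mp ht
          simp only [Function.comp_apply]
          -- abbreviations for the suffix tables
          have harr2 : arr = (e ++ [o]) ++ rest := by rw [harr]; simp
          have hlenEO : ((e ++ [o]).length : Int) = (k : Int) + 1 := by simp [hk]
          have hshiftA : ∀ m : Int, 0 ≤ m →
              PySem.List.pyGetD arr ((k : Int) + 1 + m) 0 = PySem.List.pyGetD rest m 0 := by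
            intro m hm
            conv_lhs => rw [harr2]
            rw [← hlenEO, pyGetD_append_shift (e ++ [o]) rest m 0 hm]
          have hxv : PySem.List.pyGetD arr ((k : Int) + 1 + (t : Int)) 0 =
              PySem.List.pyGetD rest (0 + (t : Int)) 0 := by
            rw [hshiftA (t : Int) (by positivity)]; norm_num
          have hstv : PySem.List.pyGetD (stB arr 0 none) ((k : Int) + 1 + (t : Int)) 0 =
              PySem.List.pyGetD (stB rest 0 none) (t : Int) 0 + ((k : Int) + 1) := by
            rw [hst, List.append_cons]
            rw [show (k : Int) + 1 + (t : Int) =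
              (((List.replicate k (0 : Int) ++ [(k : Int)]).length : Int) + (t : Int)) by simp,
              pyGetD_append_shift _ _ (t : Int) 0 (by positivity)]
            have hlt : (t : Int) < (((stB rest 0 none).map (· + ((k : Int) + 1))).length : Int) := by
              simp [length_stB]; exact_mod_cast htl
            rw [PySem.List.pyGetD_eq_getElem _ _ (by positivity) hlt, List.getElem_map,
              PySem.List.pyGetD_eq_getElem _ _ (by positivity)
                (by simp [length_stB]; exact_mod_cast htl)]
          have henv : PySem.List.pyGetD (enB arr 0) ((k : Int) + 1 + (t : Int)) 0 =
              PySem.List.pyGetD (enB rest 0) (t : Int) 0 + ((k : Int) + 1) := by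
            rw [hen, List.append_cons]
            rw [show (k : Int) + 1 + (t : Int) =
              (((List.replicate k ((k : Int) - 1) ++ [(k : Int)]).length : Int) + (t : Int)) by simp,
              pyGetD_append_shift _ _ (t : Int) 0 (by positivity)]
            have hlt : (t : Int) < (((enB rest 0).map (· + ((k : Int) + 1))).length : Int) := by
              simp [length_enB]; exact_mod_cast htl
            rw [PySem.List.pyGetD_eq_getElem _ _ (by positivity) hlt, List.getElem_map,
              PySem.List.pyGetD_eq_getElem _ _ (by positivity)
                (by simp [length_enB]; exact_mod_cast htl)]
          -- the two branch tests agree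
          by_cases hpar : PySem.Int.mod (PySem.List.pyGetD rest (0 + (t : Int)) 0) 2 = 0
          · -- even: both sides read the mirrored position of the same run
            rw [fB_even _ _ _ _ (by rw [hxv]; exact hpar), fB_even _ _ _ _ hpar]
            rw [hstv, henv]
            have hs0 : 0 ≤ PySem.List.pyGetD (stB rest 0 none) (t : Int) 0 := by
              apply stB_mem_lb rest 0 0 none (by simp) le_rfl
              rw [PySem.List.pyGetD_eq_getElem _ _ (by positivity)
                (by simp [length_stB]; exact_mod_cast htl)]
              exact List.getElem_mem _
            have he0 : (t : Int) ≤ PySem.List.pyGetD (enB rest 0) (t : Int) 0 := by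
              have h1 := enB_getD_lb rest 0 t htl
              rw [List.getD_eq_getElem _ _ (by rw [length_enB]; exact htl)] at h1
              rw [PySem.List.pyGetD_eq_getElem _ _ (by positivity)
                (by simp [length_enB]; exact_mod_cast htl)]
              simpa using h1
            rw [show PySem.List.pyGetD (stB rest 0 none) (t : Int) 0 + ((k : Int) + 1) +
                (PySem.List.pyGetD (enB rest 0) (t : Int) 0 + ((k : Int) + 1)) -
                ((k : Int) + 1 + (t : Int)) =
                (k : Int) + 1 + (PySem.List.pyGetD (stB rest 0 none) (t : Int) 0 +
                  PySem.List.pyGetD (enB rest 0) (t : Int) 0 - (t : Int)) by ring]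
            rw [hshiftA _ (by omega)]
            norm_num
          · rw [fB_odd _ _ _ _ (by rw [hxv]; exact hpar), fB_odd _ _ _ _ hpar, hxv]

-- ===== VERDICT (by name: the statement is the Claim_ definition above) =====
theorem rev_sub_spec : Claim_equal_rev_sub := by
  intro arr _
  unfold Spec_rev_sub rev_sub_alt
  rw [rev_sub_eq_groups]
  exact (mapOut_eq_groups arr.length arr le_rfl).symm
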